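-- pv_equiv track=rewrite | github.com/whyynoot/train_schedule | main.py | calculate_schedule
-- ===== SOURCE A (Python) =====
-- def calculate_schedule(routes, time, intervals):
--     time_schedule = {}
--     for route in routes:
--         for stations in routes[route]:
--             if stations not in time_schedule:
--                 time_schedule.update({stations: []})
--     for route in routes:
--         interval = intervals[route]
--         flag = time[route][0]
--         end = time[route][1]
--         for stations in routes[route]:
--             destanation = stations
--         while flag <= end:
--             train = flag
--             for stations in routes[route]:
--                 destanation = stations
--             for stations in routes[route]:
--                 train += routes[route][stations][0]
--                 time_schedule[stations].append({str(train): [route, destanation]})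
--             flag += interval
--     for route in routes:
--         interval = intervals[route]
--         flag = time[route][0]
--         end = time[route][1]
--         for stations in reversed(routes[route]):
--             destanation = stations
--         while flag <= end:
--             train = flag
--             for stations in reversed(routes[route]):
--                 destanation = stations
--             for stations in reversed(routes[route]):
--                 train += routes[route][stations][1]
--                 time_schedule[stations].append({str(train): [route, destanation]})
--             flag += interval
--     return time_schedule
-- ===== SOURCE B (Python) =====
-- def calculate_schedule(routes, time, intervals):
--     schedule = {s: [] for sts in routes.values() for s in sts}
--     for direction in (0, 1):
--         for route, sts in routes.items():
--             stops = list(sts.items()) if direction == 0 else list(sts.items())[::-1]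
--             start, end, step = time[route][0], time[route][1], intervals[route]
--             if not stops or end < start:
--                 continue
--             dest = stops[-1][0]
--             offset = 0
--             for s, deltas in stops:
--                 offset += deltas[direction]
--                 schedule[s].extend({str(t + offset): [route, dest]}
--                                    for t in range(start, end + 1, step))
--     return schedule
-- ===== Notes on version B (the rewrite author's own statement) =====
-- stated objective: alternative
-- what changed: B interchanges the loops: instead of A's time-outer/station-inner passes that re-scan the station dict for the destination and re-accumulate offsets for every departure, B iterates stations once per route/direction with a running offset and extends each station's list with its whole block of departure times at once; this changes the emission order, which is valid because entries for different stations go to disjoint lists. …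
import Mathlib
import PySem

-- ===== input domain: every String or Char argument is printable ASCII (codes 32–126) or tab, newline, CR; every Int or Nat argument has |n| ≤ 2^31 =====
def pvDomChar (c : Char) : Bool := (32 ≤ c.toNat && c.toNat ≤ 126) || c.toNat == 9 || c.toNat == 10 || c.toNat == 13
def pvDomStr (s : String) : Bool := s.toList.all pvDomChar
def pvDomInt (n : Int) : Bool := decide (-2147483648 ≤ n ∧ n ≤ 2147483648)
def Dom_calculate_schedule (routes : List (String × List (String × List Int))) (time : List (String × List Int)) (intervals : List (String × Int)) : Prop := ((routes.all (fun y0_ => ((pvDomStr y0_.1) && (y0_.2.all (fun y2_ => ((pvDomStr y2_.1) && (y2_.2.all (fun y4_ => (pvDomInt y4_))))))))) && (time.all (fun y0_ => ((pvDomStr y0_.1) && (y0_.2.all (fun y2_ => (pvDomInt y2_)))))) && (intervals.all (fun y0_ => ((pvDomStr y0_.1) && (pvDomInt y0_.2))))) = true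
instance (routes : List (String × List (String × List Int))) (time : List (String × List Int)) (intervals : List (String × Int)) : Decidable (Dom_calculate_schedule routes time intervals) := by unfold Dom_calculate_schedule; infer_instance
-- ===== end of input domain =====

-- One line: B interchanges A's loops — stations outer, departure times inner, extending each
-- station's list with its whole block at once (objective: alternative decomposition, same cost).

-- ===== PORT A =====
-- the body of A's `while flag <= end` loop: re-scan routes[route] for the destination,
-- then walk the stations accumulating `train` and appending (order/index fixed by the caller)
def pvAStep (r : String) (order : List (String × List Int)) (idx : Int) (flag : Int)
    (d : PySem.Dict String (List (List (String × List String)))) :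
    PySem.Dict String (List (List (String × List String))) :=
  -- `destanation` (the inner re-scan of the station dict) and `train` are inlined values
  (order.foldl (fun (st : Int × PySem.Dict String (List (List (String × List String)))) p =>
      (st.1 + (PySem.List.pyGet? p.2 idx).getD 0,
       st.2.modify p.1 [] (· ++ [[(PySem.Int.toStr (st.1 + (PySem.List.pyGet? p.2 idx).getD 0),
         [r, order.foldl (fun _ p => p.1) ""])]]))) (flag, d)).2

-- A's `while flag <= end: …; flag += interval`; the fuel only makes it total (under
-- Pre_ the interval is ≥ 1 whenever the loop runs, so the fuel never runs out)
def pvAWhile (step : Int → PySem.Dict String (List (List (String × List String))) → PySem.Dict String (List (List (String × List String))))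
    (iv endT : Int) :
    Nat → Int → PySem.Dict String (List (List (String × List String))) → PySem.Dict String (List (List (String × List String)))
  | 0, _, d => d
  | fuel + 1, flag, d => if flag ≤ endT then pvAWhile step iv endT fuel (flag + iv) (step flag d) else d

-- A's second `for route in routes` pass (forward direction)
def pvARouteF (tD : PySem.Dict String (List Int)) (iD : PySem.Dict String Int)
    (rp : String × List (String × List Int))
    (d : PySem.Dict String (List (List (String × List String)))) :
    PySem.Dict String (List (List (String × List String))) :=
  let iv := iD.getD rp.1 0
  let t := tD.getD rp.1 []
  let flag := (PySem.List.pyGet? t 0).getD 0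
  let endT := (PySem.List.pyGet? t 1).getD 0
  pvAWhile (pvAStep rp.1 rp.2 0) iv endT (endT - flag + 1).toNat flag d

-- A's third `for route in routes` pass (reversed direction)
def pvARouteR (tD : PySem.Dict String (List Int)) (iD : PySem.Dict String Int)
    (rp : String × List (String × List Int))
    (d : PySem.Dict String (List (List (String × List String)))) :
    PySem.Dict String (List (List (String × List String))) :=
  let iv := iD.getD rp.1 0
  let t := tD.getD rp.1 []
  let flag := (PySem.List.pyGet? t 0).getD 0
  let endT := (PySem.List.pyGet? t 1).getD 0
  pvAWhile (pvAStep rp.1 rp.2.reverse 1) iv endT (endT - flag + 1).toNat flag d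

def calculate_schedule (routes : List (String × List (String × List Int))) (time : List (String × List Int)) (intervals : List (String × Int)) : List (String × List (List (String × List String))) :=
  let tD := PySem.Dict.ofList time
  let iD := PySem.Dict.ofList intervals
  let ts0 := routes.foldl (fun d rp =>
    rp.2.foldl (fun d sp => if d.contains sp.1 then d else d.insert sp.1 []) d) PySem.Dict.empty
  let ts1 := routes.foldl (fun d rp => pvARouteF tD iD rp d) ts0
  let ts2 := routes.foldl (fun d rp => pvARouteR tD iD rp d) ts1
  ts2.items

-- ===== PORT B =====
-- Source B's inner route loop: stations outer with a running offset, each station's whole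
-- block of departure times appended at once with `extend`
def pvBRoute (tD : PySem.Dict String (List Int)) (iD : PySem.Dict String Int) (idx : Int)
    (rp : String × List (String × List Int))
    (d : PySem.Dict String (List (List (String × List String)))) :
    PySem.Dict String (List (List (String × List String))) :=
  let stops := if idx = 0 then rp.2 else rp.2.reverse
  let t := tD.getD rp.1 []
  let start := (PySem.List.pyGet? t 0).getD 0
  let endT := (PySem.List.pyGet? t 1).getD 0
  let iv := iD.getD rp.1 0
  if stops = [] ∨ endT < start then d
  else
    let dest := (stops.map Prod.fst).getLastD ""
    (stops.foldl (fun (st : Int × PySem.Dict String (List (List (String × List String)))) p =>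
        (st.1 + (PySem.List.pyGet? p.2 idx).getD 0,
         st.2.modify p.1 [] (· ++ (PySem.List.pyRange start (endT + 1) iv).map
           (fun tt => [(PySem.Int.toStr (tt + (st.1 + (PySem.List.pyGet? p.2 idx).getD 0)),
             [rp.1, dest])])))) ((0 : Int), d)).2

def calculate_schedule_alt (routes : List (String × List (String × List Int))) (time : List (String × List Int)) (intervals : List (String × Int)) : List (String × List (List (String × List String))) :=
  let tD := PySem.Dict.ofList time
  let iD := PySem.Dict.ofList intervals
  let init := routes.foldl (fun d rp => rp.2.foldl (fun d sp => d.insert sp.1 []) d) PySem.Dict.empty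
  (([0, 1] : List Int).foldl (fun d idx => routes.foldl (fun d rp => pvBRoute tD iD idx rp d) d) init).items

-- ===== PRECONDITION & SPEC =====
-- Pre_ holds exactly when the Python A returns: every route key must be present in `time`
-- (with at least the two entries read) and in `intervals`, and whenever the departure loop
-- actually runs (start ≤ end) the interval must be ≥ 1 (else A loops forever) and every
-- station's offset list must have the two entries the two passes read.  Pre_ additionally
-- requires the route keys and each route's station keys to be duplicate-free: routes and
-- routes[route] are Python dicts, so an association list with duplicate keys does not
-- encode any Python input, and behaviour there is an artefact of the list encoding.
def Pre_calculate_schedule (routes : List (String × List (String × List Int))) (time : List (String × List Int)) (intervals : List (String × Int)) : Prop :=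
  (routes.map Prod.fst).Nodup ∧
  ∀ rp ∈ routes,
    (rp.2.map Prod.fst).Nodup ∧
    (PySem.Dict.ofList time).contains rp.1 = true ∧
    2 ≤ ((PySem.Dict.ofList time).getD rp.1 []).length ∧
    (PySem.Dict.ofList intervals).contains rp.1 = true ∧
    ((PySem.List.pyGet? ((PySem.Dict.ofList time).getD rp.1 []) 0).getD 0 ≤
       (PySem.List.pyGet? ((PySem.Dict.ofList time).getD rp.1 []) 1).getD 0 →
      1 ≤ (PySem.Dict.ofList intervals).getD rp.1 0 ∧ ∀ sp ∈ rp.2, 2 ≤ sp.2.length)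
instance (routes : List (String × List (String × List Int))) (time : List (String × List Int)) (intervals : List (String × Int)) : Decidable (Pre_calculate_schedule routes time intervals) := by unfold Pre_calculate_schedule; infer_instance

def pvWitness_calculate_schedule : (List (String × List (String × List Int))) × (List (String × List Int)) × (List (String × Int)) :=
  ([("r", [("a", [1, 2]), ("b", [3, 4])])], [("r", [5, 7])], [("r", 2)])

def Spec_calculate_schedule (routes : List (String × List (String × List Int))) (time : List (String × List Int)) (intervals : List (String × Int)) (out : List (String × List (List (String × List String)))) : Prop := out = calculate_schedule_alt routes time intervals
instance (routes : List (String × List (String × List Int))) (time : List (String × List Int)) (intervals : List (String × Int)) (out : List (String × List (List (String × List String)))) : Decidable (Spec_calculate_schedule routes time intervals out) := by unfold Spec_calculate_schedule; infer_instance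

-- ===== CLAIM (what is proved, stated in full; the proofs are below) =====
def Claim_equal_calculate_schedule : Prop := ∀ (routes : List (String × List (String × List Int))) (time : List (String × List Int)) (intervals : List (String × Int)), Dom_calculate_schedule routes time intervals → Pre_calculate_schedule routes time intervals → Spec_calculate_schedule routes time intervals (calculate_schedule routes time intervals)

-- ===== LEMMAS AND PROOFS =====

theorem pvWitness_ok :
    Dom_calculate_schedule pvWitness_calculate_schedule.1 pvWitness_calculate_schedule.2.1 pvWitness_calculate_schedule.2.2 ∧
    Pre_calculate_schedule pvWitness_calculate_schedule.1 pvWitness_calculate_schedule.2.1 pvWitness_calculate_schedule.2.2 := by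
  constructor <;> decide

-- ---- the initialisation dictionaries agree ----

def pvInv (d : PySem.Dict String (List (List (String × List String)))) : Prop :=
  ∀ v ∈ d.values, v = []

theorem pvInv_insert (d : PySem.Dict String (List (List (String × List String)))) (s : String)
    (h : pvInv d) : pvInv (d.insert s []) := by
  intro v hv
  rcases PySem.Dict.mem_values_insert d s _ v hv with h1 | h1
  · exact h1
  · exact h v h1

theorem pvInsert_nil_of_contains (d : PySem.Dict String (List (List (String × List String)))) (s : String)
    (hc : d.contains s = true) (h : pvInv d) : d.insert s [] = d := by
  apply PySem.Dict.ext
  rw [PySem.Dict.items_insert_of_contains d _ hc]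
  conv_rhs => rw [← List.map_id d.items]
  apply List.map_congr_left
  intro p hp
  obtain ⟨p1, p2⟩ := p
  by_cases he : p1 = s
  · have hv : p2 = [] := by
      apply h
      simp only [PySem.Dict.values]
      exact List.mem_map_of_mem hp
    subst he; subst hv; simp
  · simp [he]

theorem pvInnerB_inv (sts : List (String × List Int)) :
    ∀ d, pvInv d → pvInv (sts.foldl (fun d sp => d.insert sp.1 []) d) := by
  induction sts with
  | nil => intro d h; simpa using h
  | cons sp rest ih =>
      intro d h
      simp only [List.foldl_cons]
      exact ih _ (pvInv_insert d sp.1 h)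

theorem pvInner_eq (sts : List (String × List Int)) :
    ∀ d, pvInv d →
      sts.foldl (fun d sp => if d.contains sp.1 then d else d.insert sp.1 []) d
        = sts.foldl (fun d sp => d.insert sp.1 []) d := by
  induction sts with
  | nil => intro d _; rfl
  | cons sp rest ih =>
      intro d h
      simp only [List.foldl_cons]
      by_cases hc : d.contains sp.1 = true
      · rw [if_pos hc, pvInsert_nil_of_contains d sp.1 hc h]
        exact ih _ h
      · rw [if_neg hc]
        exact ih _ (pvInv_insert d sp.1 h)

theorem pvInit_eq (routes : List (String × List (String × List Int))) :
    ∀ d, pvInv d →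
      routes.foldl (fun d rp => rp.2.foldl (fun d sp => if d.contains sp.1 then d else d.insert sp.1 []) d) d
        = routes.foldl (fun d rp => rp.2.foldl (fun d sp => d.insert sp.1 []) d) d := by
  induction routes with
  | nil => intro d _; rfl
  | cons rp rest ih =>
      intro d h
      simp only [List.foldl_cons]
      rw [pvInner_eq rp.2 d h]
      exact ih _ (pvInnerB_inv rp.2 d h)

theorem pvInit_nodup (routes : List (String × List (String × List Int))) :
    ∀ d : PySem.Dict String (List (List (String × List String))), d.keys.Nodup →
      (routes.foldl (fun d rp => rp.2.foldl (fun d sp => d.insert sp.1 []) d) d).keys.Nodup := by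
  induction routes with
  | nil => intro d h; simpa using h
  | cons rp rest ih =>
      intro d h
      simp only [List.foldl_cons]
      exact ih _ (PySem.Dict.nodup_keys_foldl_insert_key rp.2 Prod.fst (fun _ _ => []) d h)

-- ---- pyRange with a positive step, cons form ----

theorem pvRange_pos_cons (a b s : Int) (hs : 0 < s) (hab : a < b) :
    PySem.List.pyRange a b s = a :: PySem.List.pyRange (a + s) b s := by
  rw [PySem.List.pyRange_of_pos _ _ hs, PySem.List.pyRange_of_pos _ _ hs]
  have key : (b - a + s - 1) / s = (b - (a + s) + s - 1) / s + 1 := by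
    have h1 : b - a + s - 1 = (b - (a + s) + s - 1) + 1 * s := by ring
    rw [h1, Int.add_mul_ediv_right _ _ (by omega)]
  by_cases h2 : a + s < b
  · have hm : 0 ≤ b - (a + s) + s - 1 := by omega
    have hdiv : 0 ≤ (b - (a + s) + s - 1) / s := Int.ediv_nonneg hm (by omega)
    rw [if_pos hab, if_pos h2, key]
    have : ((b - (a + s) + s - 1) / s + 1).toNat = ((b - (a + s) + s - 1) / s).toNat + 1 := by omega
    rw [this, List.range_succ_eq_map]
    simp only [List.map_cons, List.map_map]
    congr 1
    · simp
    · apply List.map_congr_left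
      intro k _
      simp only [Function.comp_apply]
      push_cast
      ring
  · have h0 : (b - (a + s) + s - 1) / s = 0 := by
      apply Int.ediv_eq_zero_of_lt <;> omega
    rw [if_pos hab, if_neg h2, key, h0]
    simp [List.range_succ]

theorem pvRange_pos_nil (a b s : Int) (hs : 0 < s) (hab : b ≤ a) :
    PySem.List.pyRange a b s = [] := by
  rw [PySem.List.pyRange_of_pos _ _ hs, if_neg (by omega)]
  simp

-- ---- the while loop is the fold over range() ----

theorem pvAWhile_eq_range (step : Int → PySem.Dict String (List (List (String × List String))) → PySem.Dict String (List (List (String × List String))))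
    (iv b : Int) (hiv : 1 ≤ iv) :
    ∀ (fuel : Nat) (a : Int) d, (b - a + 1).toNat ≤ fuel →
      pvAWhile step iv b fuel a d = (PySem.List.pyRange a (b + 1) iv).foldl (fun d t => step t d) d := by
  intro fuel
  induction fuel with
  | zero =>
      intro a d hf
      have : b < a := by omega
      rw [pvRange_pos_nil _ _ _ (by omega) (by omega)]
      rfl
  | succ n ih =>
      intro a d hf
      by_cases hab : a ≤ b
      · rw [pvAWhile, if_pos hab, ih (a + iv) (step a d) (by omega),
            pvRange_pos_cons a (b + 1) iv (by omega) (by omega)]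
        simp
      · rw [pvAWhile, if_neg hab, pvRange_pos_nil _ _ _ (by omega) (by omega)]
        rfl

-- ---- a fold with a running-offset pair is a fold over the prefix-offset table ----

def pvOffsFrom (idx : Int) : Int → List (String × List Int) → List (String × Int)
  | _, [] => []
  | c, p :: ps =>
      (p.1, c + (PySem.List.pyGet? p.2 idx).getD 0) ::
        pvOffsFrom idx (c + (PySem.List.pyGet? p.2 idx).getD 0) ps

theorem pvOffsFrom_keys (idx : Int) (l : List (String × List Int)) :
    ∀ c, (pvOffsFrom idx c l).map Prod.fst = l.map Prod.fst := by
  induction l with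
  | nil => intro c; rfl
  | cons p ps ih => intro c; simp [pvOffsFrom, ih]

theorem pvPairFold_eq (idx : Int)
    (F : String → Int → PySem.Dict String (List (List (String × List String))) → PySem.Dict String (List (List (String × List String))))
    (l : List (String × List Int)) :
    ∀ (c : Int) (d : PySem.Dict String (List (List (String × List String)))),
      (l.foldl (fun (st : Int × PySem.Dict String (List (List (String × List String)))) p =>
          (st.1 + (PySem.List.pyGet? p.2 idx).getD 0,
           F p.1 (st.1 + (PySem.List.pyGet? p.2 idx).getD 0) st.2)) (c, d)).2
        = (pvOffsFrom idx c l).foldl (fun d so => F so.1 so.2 d) d := by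
  induction l with
  | nil => intro c d; rfl
  | cons p ps ih =>
      intro c d
      simp only [List.foldl_cons, pvOffsFrom]
      exact ih (c + (PySem.List.pyGet? p.2 idx).getD 0) _

theorem pvOffsFrom_shift (idx : Int) (l : List (String × List Int)) :
    ∀ a b, pvOffsFrom idx (a + b) l = (pvOffsFrom idx b l).map (fun so => (so.1, a + so.2)) := by
  induction l with
  | nil => intro a b; rfl
  | cons p ps ih =>
      intro a b
      simp only [pvOffsFrom, List.map_cons]
      rw [add_assoc, ih]

theorem pvFoldl_fst_getLastD (l : List (String × List Int)) :
    ∀ x : String, l.foldl (fun _ p => p.1) x = (l.map Prod.fst).getLastD x := by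
  induction l with
  | nil => intro x; rfl
  | cons p ps ih =>
      intro x
      simp only [List.foldl_cons, List.map_cons, List.getLastD_cons]
      exact ih p.1

-- A's one while-iteration as a fold over the prefix-offset table (offsets based at 0)
theorem pvStep_eq (r : String) (idx : Int) (order : List (String × List Int)) (flag : Int)
    (d : PySem.Dict String (List (List (String × List String)))) :
    pvAStep r order idx flag d
      = (pvOffsFrom idx 0 order).foldl
          (fun d so => d.modify so.1 []
            (· ++ [[(PySem.Int.toStr (flag + so.2), [r, (order.map Prod.fst).getLastD ""])]])) d := by
  unfold pvAStep
  rw [pvFoldl_fst_getLastD]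
  rw [pvPairFold_eq idx
    (F := fun k v d => d.modify k [] (· ++ [[(PySem.Int.toStr v, [r, (order.map Prod.fst).getLastD ""])]]))
    order flag d]
  have h := pvOffsFrom_shift idx order flag 0
  rw [add_zero] at h
  rw [h, List.foldl_map]

-- ---- getD / keys of a fold of modify-appends ----

theorem pvGetD_modify_blocks (Bf : String × Int → List (List (String × List String)))
    (offs : List (String × Int)) :
    ∀ (d : PySem.Dict String (List (List (String × List String)))) (c : String),
      (offs.foldl (fun d so => d.modify so.1 [] (· ++ Bf so)) d).getD c []
        = d.getD c [] ++ (offs.filter (fun so => so.1 == c)).flatMap Bf := by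
  induction offs with
  | nil => intro d c; simp
  | cons so rest ih =>
      intro d c
      simp only [List.foldl_cons, List.filter_cons]
      rw [ih]
      by_cases h : so.1 = c
      · simp [h]
      · have h' : c ≠ so.1 := fun he => h he.symm
        simp [PySem.Dict.getD_modify, h', h]

theorem pvUpdate_of_subset (S : List String) (l : List String) (h : ∀ x ∈ l, x ∈ S) :
    PySem.Set.update S l = S := by
  rw [PySem.Set.update_eq_append_filter]
  have : (PySem.Set.ofList l).filter (fun y => !(PySem.Set.contains S y)) = [] := by
    apply List.filter_eq_nil_iff.mpr
    intro y hy
    have hyS : y ∈ S := h y ((PySem.List.mem_dedup l y).mp hy)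
    simp [hyS]
  rw [this, List.append_nil]

-- duplicate-free keys: the filter at a key has at most one hit
theorem pvFilter_key_single (offs : List (String × Int)) (c : String)
    (hnd : (offs.map Prod.fst).Nodup) :
    offs.filter (fun so => so.1 == c) = []
      ∨ ∃ o, offs.filter (fun so => so.1 == c) = [(c, o)] := by
  induction offs with
  | nil => exact Or.inl rfl
  | cons so rest ih =>
      obtain ⟨s1, s2⟩ := so
      simp only [List.map_cons, List.nodup_cons] at hnd
      by_cases he : s1 = c
      · rcases ih hnd.2 with h | ⟨o, h⟩
        · refine Or.inr ⟨s2, ?_⟩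
          rw [List.filter_cons, if_pos (by simp [he]), h, he]
        · exfalso
          have hmem : (c, o) ∈ rest := by
            have h2 : (c, o) ∈ rest.filter (fun so => so.1 == c) := by
              rw [h]; exact List.mem_cons_self
            exact List.mem_of_mem_filter h2
          rw [he] at hnd
          exact hnd.1 (List.mem_map.mpr ⟨(c, o), hmem, rfl⟩)
      · rw [List.filter_cons, if_neg (by simp [he])]
        exact ih hnd.2

-- ---- the central lemma: loop interchange ----
-- A emits one entry per (time, station); B emits, per station, the whole block of times.
-- Per-station lists agree because distinct stations go to distinct dict values.
theorem pvPass_eq (ts : List Int) (offs : List (String × Int))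
    (e : Int → Int → List (String × List String))
    (hts : ts ≠ []) (hnd : (offs.map Prod.fst).Nodup)
    (d : PySem.Dict String (List (List (String × List String)))) (hk : d.keys.Nodup) :
    ts.foldl (fun d t => offs.foldl (fun d so => d.modify so.1 [] (· ++ [e t so.2])) d) d
      = offs.foldl (fun d so => d.modify so.1 [] (· ++ ts.map (fun t => e t so.2))) d := by
  -- getD agrees at every key
  have hgetA : ∀ (l : List Int) (dd : PySem.Dict String (List (List (String × List String)))) (c : String),
      (l.foldl (fun d t => offs.foldl (fun d so => d.modify so.1 [] (· ++ [e t so.2])) d) dd).getD c []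
        = dd.getD c [] ++ l.flatMap (fun t => (offs.filter (fun so => so.1 == c)).map (fun so => e t so.2)) := by
    intro l
    induction l with
    | nil => intro dd c; simp
    | cons t rest ih =>
        intro dd c
        simp only [List.foldl_cons, List.flatMap_cons]
        rw [ih, pvGetD_modify_blocks (fun so => [e t so.2]) offs dd c, List.append_assoc]
        congr 1
        congr 1
        induction offs.filter (fun so => so.1 == c) with
        | nil => rfl
        | cons a as ih2 => simp [ih2]
  have hgetB : ∀ c, (offs.foldl (fun d so => d.modify so.1 [] (· ++ ts.map (fun t => e t so.2))) d).getD c []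
      = d.getD c [] ++ (offs.filter (fun so => so.1 == c)).flatMap (fun so => ts.map (fun t => e t so.2)) :=
    fun c => pvGetD_modify_blocks (fun so => ts.map (fun t => e t so.2)) offs d c
  -- keys agree
  have hstepK : ∀ (t : Int) (dd : PySem.Dict String (List (List (String × List String)))),
      (offs.foldl (fun d so => d.modify so.1 [] (· ++ [e t so.2])) dd).keys
        = PySem.Set.update dd.keys (offs.map Prod.fst) := by
    intro t dd
    rw [PySem.Dict.keys_foldl_modify_key _ Prod.fst]
  have hauxK : ∀ (l : List Int) (dd : PySem.Dict String (List (List (String × List String)))),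
      (∀ x ∈ offs.map Prod.fst, x ∈ dd.keys) →
      (l.foldl (fun d t => offs.foldl (fun d so => d.modify so.1 [] (· ++ [e t so.2])) d) dd).keys = dd.keys := by
    intro l
    induction l with
    | nil => intro dd _; rfl
    | cons t rest ih =>
        intro dd h
        simp only [List.foldl_cons]
        have hstep : (offs.foldl (fun d so => d.modify so.1 [] (· ++ [e t so.2])) dd).keys = dd.keys := by
          rw [hstepK t dd, pvUpdate_of_subset _ _ h]
        rw [ih _ (by rw [hstep]; exact h), hstep]
  obtain ⟨t0, ts', hts0⟩ := List.exists_cons_of_ne_nil hts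
  have hkeysA : (ts.foldl (fun d t => offs.foldl (fun d so => d.modify so.1 [] (· ++ [e t so.2])) d) d).keys
      = PySem.Set.update d.keys (offs.map Prod.fst) := by
    rw [hts0]
    simp only [List.foldl_cons]
    rw [hauxK ts' _ (by
      rw [hstepK t0 d]
      intro x hx
      simp only [pysem]
      obtain ⟨b, hb, rfl⟩ := List.mem_map.mp hx
      exact Or.inr ⟨b, hb, rfl⟩), hstepK t0 d]
  have hkeysB : (offs.foldl (fun d so => d.modify so.1 [] (· ++ ts.map (fun t => e t so.2))) d).keys
      = PySem.Set.update d.keys (offs.map Prod.fst) := by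
    rw [PySem.Dict.keys_foldl_modify_key _ Prod.fst]
  have hKnd : (PySem.Set.update d.keys (offs.map Prod.fst)).Nodup := PySem.Set.nodup_update _ _ hk
  -- assemble via items
  apply PySem.Dict.ext
  rw [PySem.Dict.items_eq_map_keys _ (by rw [hkeysA]; exact hKnd) [],
      PySem.Dict.items_eq_map_keys _ (by rw [hkeysB]; exact hKnd) [],
      hkeysA, hkeysB]
  apply List.map_congr_left
  intro k _
  congr 1
  rw [hgetA ts d k, hgetB k]
  congr 1
  rcases pvFilter_key_single offs k hnd with h | ⟨o, h⟩
  · simp [h]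
  · simp [h, ← List.map_eq_flatMap]

-- canonical (block) form of pvBRoute
theorem pvBRoute_blocks (tD : PySem.Dict String (List Int)) (iD : PySem.Dict String Int)
    (idx : Int) (rp : String × List (String × List Int))
    (d : PySem.Dict String (List (List (String × List String)))) :
    pvBRoute tD iD idx rp d =
      (if (if idx = 0 then rp.2 else rp.2.reverse) = []
          ∨ (PySem.List.pyGet? (tD.getD rp.1 []) 1).getD 0 < (PySem.List.pyGet? (tD.getD rp.1 []) 0).getD 0
       then d
       else
         (pvOffsFrom idx 0 (if idx = 0 then rp.2 else rp.2.reverse)).foldl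
           (fun d so => d.modify so.1 []
             (· ++ (PySem.List.pyRange ((PySem.List.pyGet? (tD.getD rp.1 []) 0).getD 0)
                 ((PySem.List.pyGet? (tD.getD rp.1 []) 1).getD 0 + 1) (iD.getD rp.1 0)).map
               (fun tt => [(PySem.Int.toStr (tt + so.2),
                 [rp.1, ((if idx = 0 then rp.2 else rp.2.reverse).map Prod.fst).getLastD ""])]))) d) := by
  simp only [pvBRoute]
  split
  · split
    · rfl
    · exact pvPairFold_eq idx
        (F := fun k v d => d.modify k []
          (· ++ (PySem.List.pyRange ((PySem.List.pyGet? (tD.getD rp.1 []) 0).getD 0)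
              ((PySem.List.pyGet? (tD.getD rp.1 []) 1).getD 0 + 1) (iD.getD rp.1 0)).map
            (fun tt => [(PySem.Int.toStr (tt + v),
              [rp.1, (rp.2.map Prod.fst).getLastD ""])])))
        rp.2 0 d
  · split
    · rfl
    · exact pvPairFold_eq idx
        (F := fun k v d => d.modify k []
          (· ++ (PySem.List.pyRange ((PySem.List.pyGet? (tD.getD rp.1 []) 0).getD 0)
              ((PySem.List.pyGet? (tD.getD rp.1 []) 1).getD 0 + 1) (iD.getD rp.1 0)).map
            (fun tt => [(PySem.Int.toStr (tt + v),
              [rp.1, (rp.2.reverse.map Prod.fst).getLastD ""])])))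
        rp.2.reverse 0 d

theorem pvBRoute_nodup (tD : PySem.Dict String (List Int)) (iD : PySem.Dict String Int)
    (idx : Int) (rp : String × List (String × List Int))
    (d : PySem.Dict String (List (List (String × List String)))) (hk : d.keys.Nodup) :
    (pvBRoute tD iD idx rp d).keys.Nodup := by
  rw [pvBRoute_blocks]
  split <;> split
  · exact hk
  · rw [PySem.Dict.keys_foldl_modify_key _ Prod.fst]
    exact PySem.Set.nodup_update _ _ hk
  · exact hk
  · rw [PySem.Dict.keys_foldl_modify_key _ Prod.fst]
    exact PySem.Set.nodup_update _ _ hk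

-- ---- one route: A's pass equals B's pass ----
theorem pvRoute_eq (tD : PySem.Dict String (List Int)) (iD : PySem.Dict String Int)
    (idx : Int) (rp : String × List (String × List Int))
    (d : PySem.Dict String (List (List (String × List String)))) (hk : d.keys.Nodup)
    (hnd : (rp.2.map Prod.fst).Nodup)
    (hiv : (PySem.List.pyGet? (tD.getD rp.1 []) 0).getD 0 ≤ (PySem.List.pyGet? (tD.getD rp.1 []) 1).getD 0 →
          1 ≤ iD.getD rp.1 0) :
    pvAWhile (pvAStep rp.1 (if idx = 0 then rp.2 else rp.2.reverse) idx) (iD.getD rp.1 0)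
        ((PySem.List.pyGet? (tD.getD rp.1 []) 1).getD 0)
        (((PySem.List.pyGet? (tD.getD rp.1 []) 1).getD 0 - (PySem.List.pyGet? (tD.getD rp.1 []) 0).getD 0 + 1).toNat)
        ((PySem.List.pyGet? (tD.getD rp.1 []) 0).getD 0) d
      = pvBRoute tD iD idx rp d := by
  rw [pvBRoute_blocks]
  set order := (if idx = 0 then rp.2 else rp.2.reverse) with horder
  set a := (PySem.List.pyGet? (tD.getD rp.1 []) 0).getD 0 with ha
  set b := (PySem.List.pyGet? (tD.getD rp.1 []) 1).getD 0 with hb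
  set iv := iD.getD rp.1 0 with hiv2
  have hndo : (order.map Prod.fst).Nodup := by
    rw [horder]
    split
    · exact hnd
    · rw [List.map_reverse]
      exact List.nodup_reverse.mpr hnd
  by_cases hab : b < a
  · have h0 : (b - a + 1).toNat = 0 := by omega
    rw [h0, if_pos (Or.inr hab)]
    rfl
  · have hiv1 : 1 ≤ iv := hiv (by omega)
    rw [pvAWhile_eq_range _ iv b hiv1 _ a d (by omega)]
    by_cases ho : order = []
    · rw [if_pos (Or.inl ho), ho]
      calc (PySem.List.pyRange a (b + 1) iv).foldl (fun d t => pvAStep rp.1 [] idx t d) d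
          = (PySem.List.pyRange a (b + 1) iv).foldl (fun d _ => d) d :=
            PySem.List.foldl_congr_mem _ _ _ _ (fun _ _ _ => rfl)
        _ = d := PySem.List.foldl_ignore _ _
    · rw [if_neg (by simp only [not_or]; exact ⟨ho, by omega⟩)]
      have hA : (PySem.List.pyRange a (b + 1) iv).foldl (fun d t => pvAStep rp.1 order idx t d) d
          = (PySem.List.pyRange a (b + 1) iv).foldl (fun d t =>
              (pvOffsFrom idx 0 order).foldl (fun d so => d.modify so.1 []
                (· ++ [[(PySem.Int.toStr (t + so.2), [rp.1, (order.map Prod.fst).getLastD ""])]])) d) d :=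
        PySem.List.foldl_congr_mem _ _ _ _ (fun acc x _ => pvStep_eq rp.1 idx order x acc)
      rw [hA]
      have hts' : PySem.List.pyRange a (b + 1) iv ≠ [] := by
        rw [pvRange_pos_cons a (b + 1) iv (by omega) (by omega)]
        exact List.cons_ne_nil _ _
      exact pvPass_eq (PySem.List.pyRange a (b + 1) iv) (pvOffsFrom idx 0 order)
        (fun t o => [(PySem.Int.toStr (t + o), [rp.1, (order.map Prod.fst).getLastD ""])])
        hts' (by rw [pvOffsFrom_keys]; exact hndo) d hk

-- a fold congruence that carries the keys-Nodup invariant through the chain of routes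
theorem pvFoldl_congr_nodup {α : Type}
    (l : List α)
    (f g : PySem.Dict String (List (List (String × List String))) → α → PySem.Dict String (List (List (String × List String))))
    (hfg : ∀ d x, x ∈ l → d.keys.Nodup → f d x = g d x)
    (hg : ∀ d x, d.keys.Nodup → (g d x).keys.Nodup) :
    ∀ d, d.keys.Nodup → l.foldl f d = l.foldl g d := by
  induction l with
  | nil => intro d _; rfl
  | cons x rest ih =>
      intro d hk
      simp only [List.foldl_cons]
      rw [hfg d x (by simp) hk]
      exact ih (fun d y hy => hfg d y (by simp [hy])) _ (hg d x hk)

-- ===== VERDICT (by name: the statement is the Claim_ definition above) =====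
theorem calculate_schedule_spec : Claim_equal_calculate_schedule := by
  intro routes time intervals _hdom hpre
  unfold Spec_calculate_schedule
  unfold calculate_schedule calculate_schedule_alt
  simp only [List.foldl_cons, List.foldl_nil]
  congr 1
  rw [pvInit_eq routes PySem.Dict.empty (by intro v hv; simp [PySem.Dict.values, PySem.Dict.empty] at hv)]
  set tD := PySem.Dict.ofList time
  set iD := PySem.Dict.ofList intervals
  set d0 := routes.foldl (fun d rp => rp.2.foldl (fun d sp => d.insert sp.1 []) d) PySem.Dict.empty with hd0
  have hk0 : d0.keys.Nodup :=
    pvInit_nodup routes PySem.Dict.empty (by simp [PySem.Dict.keys, PySem.Dict.empty])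
  obtain ⟨_hndr, hpre2⟩ := hpre
  have hpres : ∀ (idx : Int) (l : List (String × List (String × List Int))) d, d.keys.Nodup →
      (l.foldl (fun d rp => pvBRoute tD iD idx rp d) d).keys.Nodup := by
    intro idx l
    induction l with
    | nil => intro d h; simpa using h
    | cons rp rest ih =>
        intro d h
        simp only [List.foldl_cons]
        exact ih _ (pvBRoute_nodup tD iD idx rp d h)
  have hF : ∀ d, d.keys.Nodup →
      routes.foldl (fun d rp => pvARouteF tD iD rp d) d = routes.foldl (fun d rp => pvBRoute tD iD 0 rp d) d := by
    intro d hk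
    refine pvFoldl_congr_nodup routes _ _ ?_ (fun d rp hk => pvBRoute_nodup tD iD 0 rp d hk) d hk
    intro d rp hrp hk
    obtain ⟨hnds, _, _, _, h5⟩ := hpre2 rp hrp
    have heq := pvRoute_eq tD iD 0 rp d hk hnds (fun hle => (h5 hle).1)
    rw [if_pos rfl] at heq
    exact heq
  have hR : ∀ d, d.keys.Nodup →
      routes.foldl (fun d rp => pvARouteR tD iD rp d) d = routes.foldl (fun d rp => pvBRoute tD iD 1 rp d) d := by
    intro d hk
    refine pvFoldl_congr_nodup routes _ _ ?_ (fun d rp hk => pvBRoute_nodup tD iD 1 rp d hk) d hk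
    intro d rp hrp hk
    obtain ⟨hnds, _, _, _, h5⟩ := hpre2 rp hrp
    have heq := pvRoute_eq tD iD 1 rp d hk hnds (fun hle => (h5 hle).1)
    rw [if_neg (by norm_num)] at heq
    exact heq
  rw [hF d0 hk0, hR _ (hpres 0 routes d0 hk0)]
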